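-- pv_equiv track=rewrite | github.com/dgsim126/Algo_Study_2 | Programmers/김선엽/250417/격자판의 숫자 이어 붙이기.py | solution
-- ===== SOURCE A (Python) =====
-- from collections import deque
--
-- def solution(board):
--     queue = deque([])
--     for i in range(4):
--         for j in range(4):
--             queue.append([i, j, 0, board[i][j]])
--
--     numbers = set()
--
--     direction = ([-1, 0], [1, 0], [0, -1], [0, 1])
--
--     while queue:
--         x, y, t, cur = queue.popleft()
--
--         if t < 6:
--             for dx, dy in direction:
--                 rx, ry = x + dx, y + dy
--                 if 0 <= rx < 4 and 0 <= ry < 4: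
--                     queue.append([rx, ry, t+1, cur+board[rx][ry]])
--         else:
--             numbers.add(cur)
--
--     return len(numbers)
-- ===== SOURCE B (Python) =====
-- def solution(board):
--     numbers = set()
--
--     def dfs(x, y, r, cur):
--         if r <= 0:
--             numbers.add(cur)
--             return
--         for dx, dy in ((-1, 0), (1, 0), (0, -1), (0, 1)):
--             rx, ry = x + dx, y + dy
--             if 0 <= rx < 4 and 0 <= ry < 4:
--                 dfs(rx, ry, r - 1, cur + board[rx][ry])
--
--     for i in range(4):
--         for j in range(4):
--             dfs(i, j, 6, board[i][j])
--
--     return len(numbers)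
-- ===== Notes on version B (the rewrite author's own statement) =====
-- stated objective: alternative
-- what changed: A's iterative BFS with an explicit FIFO deque of [x, y, depth, prefix] states is replaced by a recursive DFS helper that descends with a remaining-step counter and adds the completed concatenation to the set at the leaves.
import Mathlib
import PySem

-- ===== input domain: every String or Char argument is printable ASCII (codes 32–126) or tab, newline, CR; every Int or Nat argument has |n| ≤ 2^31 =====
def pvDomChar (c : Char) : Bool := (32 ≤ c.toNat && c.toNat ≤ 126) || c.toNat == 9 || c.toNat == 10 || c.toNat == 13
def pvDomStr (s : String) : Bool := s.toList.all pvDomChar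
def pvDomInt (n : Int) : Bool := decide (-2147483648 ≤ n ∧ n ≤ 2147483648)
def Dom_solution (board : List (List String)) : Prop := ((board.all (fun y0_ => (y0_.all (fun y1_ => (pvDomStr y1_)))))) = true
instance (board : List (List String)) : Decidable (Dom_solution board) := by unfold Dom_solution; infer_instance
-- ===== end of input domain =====

-- B replaces A's iterative BFS over an explicit FIFO queue by a recursive DFS descending
-- with a remaining-step counter (alternative decomposition, same result).
-- Modelling notes shared by both ports: Python's set of numbers is consumed only by add and
-- len, both independent of Python's set iteration order, so it is modelled by Std.HashSet;
-- A's collections.deque is modelled by the standard front/back pair of lists, whose popleft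
-- yields exactly the deque's FIFO order.

-- ===== PORT A =====
def cellA (board : List (List String)) (x y : Int) : String :=
  (PySem.List.pyGet? ((PySem.List.pyGet? board x).getD []) y).getD ""

def dirsA : List (Int × Int) := [(-1, 0), (1, 0), (0, -1), (0, 1)]

-- loop shape of an accumulating 'for' that prepends (used by the port and its termination proof)
theorem foldl_cons_if_eq {α β : Type} (p : α → Prop) [DecidablePred p] (f : α → β)
    (l : List α) (acc : List β) :
    l.foldl (fun acc x => if p x then f x :: acc else acc) acc
      = (List.map f (l.filter (fun x => decide (p x)))).reverse ++ acc := by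
  induction l generalizing acc with
  | nil => simp
  | cons a l ih => by_cases h : p a <;> simp [h, ih]

-- termination measure for the while-loop: a queue entry of depth t weighs 5^(7-t)
def wA (t : Int) : Nat := 5 ^ (7 - t).toNat

def measA (q : List (Int × Int × Int × String)) : Nat := (q.map (fun e => wA e.2.2.1)).sum

theorem wA_pos (t : Int) : 1 ≤ wA t := Nat.one_le_pow _ 5 (by norm_num)

theorem measA_append (p q : List (Int × Int × Int × String)) :
    measA (p ++ q) = measA p + measA q := by
  unfold measA; rw [List.map_append, List.sum_append]

theorem measA_reverse (q : List (Int × Int × Int × String)) :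
    measA q.reverse = measA q := by
  unfold measA; rw [List.map_reverse, List.sum_reverse]

theorem measA_cons (e : Int × Int × Int × String) (q : List (Int × Int × Int × String)) :
    measA (e :: q) = wA e.2.2.1 + measA q := by
  unfold measA; rw [List.map_cons, List.sum_cons]

theorem measA_push (board : List (List String)) (x y t : Int) (cur : String)
    (back : List (Int × Int × Int × String)) (h : t < 6) :
    measA (dirsA.foldl (fun bk d =>
      if 0 ≤ x + d.1 ∧ x + d.1 < 4 ∧ 0 ≤ y + d.2 ∧ y + d.2 < 4 then
        (x + d.1, y + d.2, t + 1, cur ++ cellA board (x + d.1) (y + d.2)) :: bk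
      else bk) back) < wA t + measA back := by
  rw [foldl_cons_if_eq
    (p := fun d : Int × Int => 0 ≤ x + d.1 ∧ x + d.1 < 4 ∧ 0 ≤ y + d.2 ∧ y + d.2 < 4)
    (f := fun d : Int × Int =>
      (x + d.1, y + d.2, t + 1, cur ++ cellA board (x + d.1) (y + d.2))),
    measA_append, measA_reverse]
  have hle : measA (List.map (fun d : Int × Int =>
      (x + d.1, y + d.2, t + 1, cur ++ cellA board (x + d.1) (y + d.2)))
      (dirsA.filter (fun d =>
        decide (0 ≤ x + d.1 ∧ x + d.1 < 4 ∧ 0 ≤ y + d.2 ∧ y + d.2 < 4))))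
      ≤ 4 * wA (t + 1) := by
    unfold measA
    rw [List.map_map]
    have hlen := List.length_filter_le
      (fun d : Int × Int =>
        decide (0 ≤ x + d.1 ∧ x + d.1 < 4 ∧ 0 ≤ y + d.2 ∧ y + d.2 < 4)) dirsA
    simp only [Function.comp_def, List.map_const', List.sum_replicate, smul_eq_mul]
    have h4 : dirsA.length = 4 := rfl
    exact Nat.mul_le_mul_right _ (by omega)
  have hw : wA t = 5 * wA (t + 1) := by
    unfold wA
    have hk : (7 - t).toNat = (7 - (t + 1)).toNat + 1 := by omega
    rw [hk, pow_succ]; ring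
  have := wA_pos (t + 1)
  omega

def loopA (board : List (List String)) :
    List (Int × Int × Int × String) → List (Int × Int × Int × String) →
    Std.HashSet String → Std.HashSet String
  | [], [], numbers => numbers
  | [], e :: back, numbers => loopA board ((e :: back).reverse) [] numbers
  | (x, y, t, cur) :: front, back, numbers =>
    if t < 6 then
      loopA board front
        (dirsA.foldl (fun bk d =>
          if 0 ≤ x + d.1 ∧ x + d.1 < 4 ∧ 0 ≤ y + d.2 ∧ y + d.2 < 4 then
            (x + d.1, y + d.2, t + 1, cur ++ cellA board (x + d.1) (y + d.2)) :: bk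
          else bk) back) numbers
    else
      loopA board front back (numbers.insert cur)
  termination_by front back _ => (measA front + measA back, back.length)
  decreasing_by
  · have hflip : measA ((e :: back).reverse) + measA ([] : List (Int × Int × Int × String)) =
        measA ([] : List (Int × Int × Int × String)) + measA (e :: back) := by
      rw [measA_reverse]; simp [measA]
    rw [hflip]
    exact Prod.Lex.right _ (by simp)
  · apply Prod.Lex.left
    simp only [dite_eq_ite]
    have h1 := measA_push board x y t cur back (by omega)
    rw [measA_cons]
    dsimp only
    omega
  · apply Prod.Lex.left
    have := wA_pos t
    rw [measA_cons]
    dsimp only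
    omega

def solution (board : List (List String)) : Int :=
  let back0 := (PySem.List.pyRange 0 4 1).foldl (fun bk i =>
    (PySem.List.pyRange 0 4 1).foldl
      (fun bk j => (i, j, (0 : Int), cellA board i j) :: bk) bk)
    ([] : List (Int × Int × Int × String))
  ((loopA board [] back0 (∅ : Std.HashSet String)).size : Int)

-- ===== PORT B =====
def cellB (board : List (List String)) (x y : Int) : String :=
  (PySem.List.pyGet? ((PySem.List.pyGet? board x).getD []) y).getD ""

def dirsB : List (Int × Int) := [(-1, 0), (1, 0), (0, -1), (0, 1)]

def dfsB (board : List (List String)) (x y r : Int) (cur : String)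
    (numbers : Std.HashSet String) : Std.HashSet String :=
  if r ≤ 0 then numbers.insert cur
  else dirsB.foldl (fun acc d =>
    if 0 ≤ x + d.1 ∧ x + d.1 < 4 ∧ 0 ≤ y + d.2 ∧ y + d.2 < 4 then
      dfsB board (x + d.1) (y + d.2) (r - 1) (cur ++ cellB board (x + d.1) (y + d.2)) acc
    else acc) numbers
  termination_by r.toNat
  decreasing_by omega

def solution_alt (board : List (List String)) : Int :=
  let numbers := (PySem.List.pyRange 0 4 1).foldl (fun s i =>
    (PySem.List.pyRange 0 4 1).foldl (fun s j => dfsB board i j 6 (cellB board i j) s) s)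
    (∅ : Std.HashSet String)
  (numbers.size : Int)

-- ===== PRECONDITION & SPEC =====
-- Pre_ excludes exactly the boards on which A raises IndexError: fewer than 4 rows,
-- or one of the first 4 rows shorter than 4.
def Pre_solution (board : List (List String)) : Prop :=
  4 ≤ board.length ∧ ∀ row ∈ board.take 4, 4 ≤ row.length
instance (board : List (List String)) : Decidable (Pre_solution board) := by
  unfold Pre_solution; infer_instance

def pvWitness_solution : List (List String) :=
  [["1", "2", "3", "4"], ["5", "6", "7", "8"], ["9", "0", "1", "2"], ["3", "4", "5", "6"]]

def Spec_solution (board : List (List String)) (out : Int) : Prop := out = solution_alt board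
instance (board : List (List String)) (out : Int) : Decidable (Spec_solution board out) := by
  unfold Spec_solution; infer_instance

-- ===== CLAIM (what is proved, stated in full; the proofs are below) =====
def Claim_equal_solution : Prop := ∀ (board : List (List String)), Dom_solution board → Pre_solution board → Spec_solution board (solution board)

-- ===== LEMMAS AND PROOFS =====

-- the multiset of strings reachable from (x, y, cur) in exactly k extension steps
def span (board : List (List String)) : Nat → Int → Int → String → List String
  | 0, _, _, cur => [cur]
  | k + 1, x, y, cur =>
    (dirsA.filter (fun d =>
        decide (0 ≤ x + d.1 ∧ x + d.1 < 4 ∧ 0 ≤ y + d.2 ∧ y + d.2 < 4))).flatMap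
      (fun d => span board k (x + d.1) (y + d.2) (cur ++ cellA board (x + d.1) (y + d.2)))

theorem loopA_mem (board : List (List String))
    (front back : List (Int × Int × Int × String))
    (numbers : Std.HashSet String) (s : String) :
    s ∈ loopA board front back numbers ↔
      s ∈ numbers ∨ ∃ e ∈ front ++ back.reverse,
        s ∈ span board (6 - e.2.2.1).toNat e.1 e.2.1 e.2.2.2 := by
  fun_induction loopA board front back numbers with
  | case1 numbers => simp
  | case2 e back numbers ih =>
    rw [ih]
    simp [List.mem_append]
  | case3 x y t cur front back numbers h ih =>
    simp only [dite_eq_ite] at ih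
    rw [ih, foldl_cons_if_eq
      (p := fun d : Int × Int => 0 ≤ x + d.1 ∧ x + d.1 < 4 ∧ 0 ≤ y + d.2 ∧ y + d.2 < 4)
      (f := fun d : Int × Int =>
        (x + d.1, y + d.2, t + 1, cur ++ cellA board (x + d.1) (y + d.2)))]
    have hk : (6 - t).toNat = (6 - (t + 1)).toNat + 1 := by omega
    have hch : (∃ d, d ∈ dirsA.filter (fun d =>
          decide (0 ≤ x + d.1 ∧ x + d.1 < 4 ∧ 0 ≤ y + d.2 ∧ y + d.2 < 4)) ∧
          s ∈ span board (6 - (t + 1)).toNat (x + d.1) (y + d.2)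
            (cur ++ cellA board (x + d.1) (y + d.2))) ↔
        s ∈ span board (6 - t).toNat x y cur := by
      rw [hk]
      simp only [span, List.mem_flatMap]
    simp only [List.mem_append, List.mem_reverse, List.mem_cons, List.mem_map, or_and_right,
      exists_or, exists_eq_left, exists_exists_and_eq_and]
    rw [hch]
    constructor
    · rintro (h1 | h2 | h3 | h4)
      exacts [Or.inl h1, Or.inr (Or.inl (Or.inr h2)), Or.inr (Or.inl (Or.inl h3)),
        Or.inr (Or.inr h4)]
    · rintro (h1 | (h3 | h2) | h4)
      exacts [Or.inl h1, Or.inr (Or.inr (Or.inl h3)), Or.inr (Or.inl h2),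
        Or.inr (Or.inr (Or.inr h4))]
  | case4 x y t cur front back numbers h ih =>
    rw [ih]
    have hk : (6 - t).toNat = 0 := by omega
    simp only [Std.HashSet.mem_insert, beq_iff_eq, List.mem_cons, List.mem_append]
    constructor
    · rintro ((rfl | h1) | ⟨e, he, hs⟩)
      · exact Or.inr ⟨(x, y, t, cur), by simp, by simp [hk, span]⟩
      · exact Or.inl h1
      · exact Or.inr ⟨e, by tauto, hs⟩
    · rintro (h1 | ⟨e, he, hs⟩)
      · exact Or.inl (Or.inr h1)
      rcases he with ((rfl | he) | he)
      · simp [hk, span] at hs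
        exact Or.inl (Or.inl hs.symm)
      · exact Or.inr ⟨e, by tauto, hs⟩
      · exact Or.inr ⟨e, by tauto, hs⟩

theorem dfsB_mem (board : List (List String)) : ∀ (n : Nat) (x y r : Int), r.toNat = n →
    ∀ (cur : String) (acc : Std.HashSet String) (s : String),
      s ∈ dfsB board x y r cur acc ↔ s ∈ acc ∨ s ∈ span board n x y cur := by
  intro n
  induction n with
  | zero =>
    intro x y r hr cur acc s
    rw [dfsB, if_pos (by omega : r ≤ 0)]
    simp only [Std.HashSet.mem_insert, beq_iff_eq, span, List.mem_singleton]
    tauto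
  | succ k ih =>
    intro x y r hr cur acc s
    rw [dfsB, if_neg (by omega : ¬ r ≤ 0)]
    have hr' : (r - 1).toNat = k := by omega
    have main : ∀ (ds : List (Int × Int)) (acc : Std.HashSet String),
        s ∈ ds.foldl (fun acc d =>
          if 0 ≤ x + d.1 ∧ x + d.1 < 4 ∧ 0 ≤ y + d.2 ∧ y + d.2 < 4 then
            dfsB board (x + d.1) (y + d.2) (r - 1) (cur ++ cellB board (x + d.1) (y + d.2)) acc
          else acc) acc ↔
        s ∈ acc ∨ ∃ d ∈ ds, (0 ≤ x + d.1 ∧ x + d.1 < 4 ∧ 0 ≤ y + d.2 ∧ y + d.2 < 4) ∧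
          s ∈ span board k (x + d.1) (y + d.2) (cur ++ cellA board (x + d.1) (y + d.2)) := by
      intro ds
      induction ds with
      | nil => simp
      | cons d ds ihd =>
        intro acc
        simp only [List.foldl_cons, List.mem_cons, or_and_right, exists_or, exists_eq_left]
        by_cases hd : 0 ≤ x + d.1 ∧ x + d.1 < 4 ∧ 0 ≤ y + d.2 ∧ y + d.2 < 4
        · rw [if_pos hd, ihd, ih _ _ _ hr']
          have hc : cellB = cellA := rfl
          rw [hc]
          tauto
        · rw [if_neg hd, ihd]
          tauto
    rw [main dirsB acc]
    have hd : dirsB = dirsA := rfl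
    simp only [hd, span, List.mem_flatMap, List.mem_filter, decide_eq_true_eq]
    tauto

theorem dfsB_mem6 (board : List (List String)) (x y : Int) (cur : String)
    (acc : Std.HashSet String) (s : String) :
    s ∈ dfsB board x y 6 cur acc ↔ s ∈ acc ∨ s ∈ span board 6 x y cur :=
  dfsB_mem board 6 x y 6 rfl cur acc s

theorem foldBrow_mem (board : List (List String)) (i : Int) (js : List Int)
    (acc : Std.HashSet String) (s : String) :
    s ∈ js.foldl (fun a j => dfsB board i j 6 (cellB board i j) a) acc ↔
      s ∈ acc ∨ ∃ j ∈ js, s ∈ span board 6 i j (cellA board i j) := by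
  induction js generalizing acc with
  | nil => simp
  | cons j js ihj =>
    rw [List.foldl_cons, ihj, dfsB_mem6, show cellB = cellA from rfl,
      List.exists_mem_cons_iff, or_assoc]

theorem foldB_mem (board : List (List String)) (is js : List Int) (acc : Std.HashSet String)
    (s : String) :
    s ∈ is.foldl (fun a i => js.foldl (fun a j => dfsB board i j 6 (cellB board i j) a) a) acc ↔
      s ∈ acc ∨ ∃ i ∈ is, ∃ j ∈ js, s ∈ span board 6 i j (cellA board i j) := by
  induction is generalizing acc with
  | nil => simp
  | cons i is ihi =>
    rw [List.foldl_cons, ihi, foldBrow_mem, List.exists_mem_cons_iff, or_assoc]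

theorem foldl_cons_eq_rev {α β : Type} (f : α → β) (l : List α) (acc : List β) :
    l.foldl (fun acc x => f x :: acc) acc = (l.map f).reverse ++ acc := by
  induction l generalizing acc with
  | nil => simp
  | cons a l ih => simp [ih]

theorem foldl_revapp {α β : Type} (g : α → List β) (l : List α) (acc : List β) :
    l.foldl (fun acc x => (g x).reverse ++ acc) acc = (l.flatMap g).reverse ++ acc := by
  induction l generalizing acc with
  | nil => simp
  | cons a l ih => simp [ih, List.reverse_append]

theorem seedA_eq (board : List (List String)) (is js : List Int) :
    is.foldl (fun bk i =>
      js.foldl (fun bk j => (i, j, (0 : Int), cellA board i j) :: bk) bk)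
      ([] : List (Int × Int × Int × String)) =
      (is.flatMap (fun i => js.map (fun j => (i, j, (0 : Int), cellA board i j)))).reverse := by
  have hfun : (fun (bk : List (Int × Int × Int × String)) i =>
      js.foldl (fun bk j => (i, j, (0 : Int), cellA board i j) :: bk) bk) =
      (fun bk i => (js.map (fun j => (i, j, (0 : Int), cellA board i j))).reverse ++ bk) := by
    funext bk i
    exact foldl_cons_eq_rev _ _ _
  rw [hfun, foldl_revapp, List.append_nil]

theorem solution_eq_alt (board : List (List String)) : solution board = solution_alt board := by
  simp only [solution, solution_alt, seedA_eq]
  have ndA : (loopA board []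
      ((PySem.List.pyRange 0 4 1).flatMap
        (fun i => (PySem.List.pyRange 0 4 1).map
          (fun j => (i, j, (0 : Int), cellA board i j)))).reverse
      (∅ : Std.HashSet String)).toList.Nodup :=
    List.Pairwise.imp (fun hab => beq_eq_false_iff_ne.mp hab) Std.HashSet.distinct_toList
  have ndB : ((PySem.List.pyRange 0 4 1).foldl (fun a i =>
      (PySem.List.pyRange 0 4 1).foldl (fun a j => dfsB board i j 6 (cellB board i j) a) a)
      (∅ : Std.HashSet String)).toList.Nodup :=
    List.Pairwise.imp (fun hab => beq_eq_false_iff_ne.mp hab) Std.HashSet.distinct_toList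
  have memiff : ∀ a : String,
      a ∈ (loopA board []
        ((PySem.List.pyRange 0 4 1).flatMap
          (fun i => (PySem.List.pyRange 0 4 1).map
            (fun j => (i, j, (0 : Int), cellA board i j)))).reverse
        (∅ : Std.HashSet String)).toList ↔
      a ∈ ((PySem.List.pyRange 0 4 1).foldl (fun a i =>
        (PySem.List.pyRange 0 4 1).foldl (fun a j => dfsB board i j 6 (cellB board i j) a) a)
        (∅ : Std.HashSet String)).toList := by
    intro a
    rw [Std.HashSet.mem_toList, Std.HashSet.mem_toList, loopA_mem, foldB_mem]
    simp only [List.nil_append, List.reverse_reverse, List.mem_flatMap, List.mem_map,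
      Std.HashSet.not_mem_empty, false_or]
    constructor
    · rintro ⟨e, ⟨i, hi, j, hj, rfl⟩, hs⟩
      exact ⟨i, hi, j, hj, hs⟩
    · rintro ⟨i, hi, j, hj, hs⟩
      exact ⟨_, ⟨i, hi, j, hj, rfl⟩, hs⟩
  have perm := (List.perm_ext_iff_of_nodup ndA ndB).mpr memiff
  rw [← Std.HashSet.length_toList, ← Std.HashSet.length_toList, perm.length_eq]

-- ===== VERDICT (by name: the statement is the Claim_ definition above) =====
theorem solution_spec : Claim_equal_solution := by
  intro board _ _
  unfold Spec_solution
  exact solution_eq_alt board
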